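-- pv_equiv track=rewrite | github.com/AP-MI-2021/lab-4-andrey100f | main.py | verificare_ordine_elemente_pozitive
-- ===== SOURCE A (Python) =====
-- def verificare_ordine_elemente_pozitive(lista):
--     """
--     Verifica daca elementele pozitive dintr-o lista sunt in ordine crescatoare
--     :param lista: o lista de numere intregi
--     :return: True, daca lista are aceasta proprietate, respectiv False in caz contrar
--     """
--     lista_pozitive = []
--     for i in range(len(lista)):
--         if lista[i] >= 0:
--             lista_pozitive.append(lista[i])
--     for i in range(1, len(lista_pozitive)):
--         if lista_pozitive[i - 1] > lista_pozitive[i]: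
--             return False
--     return True
-- ===== SOURCE B (Python) =====
-- def verificare_ordine_elemente_pozitive(lista):
--     """
--     Verifica daca elementele pozitive dintr-o lista sunt in ordine crescatoare
--     :param lista: o lista de numere intregi
--     :return: True, daca lista are aceasta proprietate, respectiv False in caz contrar
--     """
--     prev = None
--     for element in lista:
--         if element >= 0:
--             if prev is not None and prev > element:
--                 return False
--             prev = element
--     return True
-- ===== Notes on version B (the rewrite author's own statement) =====
-- stated objective: simpler
-- what changed: One pass keeping only the last non-negative element seen (prev), instead of building an intermediate list of positives and rescanning it by index.
import Mathlib
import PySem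

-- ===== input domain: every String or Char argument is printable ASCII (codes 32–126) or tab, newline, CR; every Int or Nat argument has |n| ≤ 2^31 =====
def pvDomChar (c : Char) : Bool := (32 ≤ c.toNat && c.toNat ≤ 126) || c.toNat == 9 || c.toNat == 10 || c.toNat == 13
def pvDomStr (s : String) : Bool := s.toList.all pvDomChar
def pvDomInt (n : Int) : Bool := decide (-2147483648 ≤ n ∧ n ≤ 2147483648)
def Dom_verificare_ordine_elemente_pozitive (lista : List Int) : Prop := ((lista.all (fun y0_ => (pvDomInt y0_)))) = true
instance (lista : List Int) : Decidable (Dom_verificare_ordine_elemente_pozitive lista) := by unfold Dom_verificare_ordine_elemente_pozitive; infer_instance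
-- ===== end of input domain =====

-- B: one pass keeping only the last non-negative element seen, instead of
-- building an intermediate positives list and rescanning it (simpler, O(1) extra space).

-- ===== PORT A =====
-- second loop of A: 'for i in range(1, len(poz)): if poz[i-1] > poz[i]: return False' / 'return True'
def pvCheckFrom (poz : List Int) (i : Nat) : Bool :=
  if i < poz.length then
    if PySem.List.pyGetD poz ((i : Int) - 1) 0 > PySem.List.pyGetD poz (i : Int) 0 then false
    else pvCheckFrom poz (i + 1)
  else true
termination_by poz.length - i

def verificare_ordine_elemente_pozitive (lista : List Int) : Bool :=
  let lista_pozitive :=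
    (PySem.List.pyRange 0 lista.length 1).foldl
      (fun acc i =>
        if PySem.List.pyGetD lista i 0 ≥ 0 then acc ++ [PySem.List.pyGetD lista i 0] else acc) []
  pvCheckFrom lista_pozitive 1

-- ===== PORT B =====
-- 'prev' is None until the first non-negative element is seen.
def pvAltGo (prev : Option Int) : List Int → Bool
  | [] => true
  | x :: xs =>
    if x ≥ 0 then
      match prev with
      | some p => if p > x then false else pvAltGo (some x) xs
      | none => pvAltGo (some x) xs
    else pvAltGo prev xs

def verificare_ordine_elemente_pozitive_alt (lista : List Int) : Bool :=
  pvAltGo none lista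

-- ===== PRECONDITION & SPEC =====
def Spec_verificare_ordine_elemente_pozitive (lista : List Int) (out : Bool) : Prop := out = verificare_ordine_elemente_pozitive_alt lista
instance (lista : List Int) (out : Bool) : Decidable (Spec_verificare_ordine_elemente_pozitive lista out) := by unfold Spec_verificare_ordine_elemente_pozitive; infer_instance

-- ===== CLAIM (what is proved, stated in full; the proofs are below) =====
def Claim_equal_verificare_ordine_elemente_pozitive : Prop := ∀ (lista : List Int), Dom_verificare_ordine_elemente_pozitive lista → Spec_verificare_ordine_elemente_pozitive lista (verificare_ordine_elemente_pozitive lista)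

-- ===== LEMMAS AND PROOFS =====

-- chain check on a fully non-negative-filtered list, with optional predecessor
def pvPairs (prev : Option Int) : List Int → Bool
  | [] => true
  | x :: xs =>
    match prev with
    | some p => !(p > x) && pvPairs (some x) xs
    | none => pvPairs (some x) xs

theorem pvAltGo_eq_pvPairs (xs : List Int) (prev : Option Int) :
    pvAltGo prev xs = pvPairs prev (xs.filter (fun x => decide (x ≥ 0))) := by
  induction xs generalizing prev with
  | nil => rfl
  | cons x xs ih =>
    by_cases hx : x ≥ 0
    · cases prev with
      | none => simp [pvAltGo, pvPairs, hx, ih]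
      | some p =>
        by_cases hpx : p > x
        · simp [pvAltGo, pvPairs, hx, hpx]
        · simp [pvAltGo, pvPairs, hx, hpx, ih]
    · simp [pvAltGo, hx, ih]

theorem pvCheckFrom_eq_pvPairs (poz : List Int) (i : Nat) (hi : 1 ≤ i) :
    pvCheckFrom poz i = pvPairs poz[i-1]? (poz.drop i) := by
  induction hn : poz.length - i generalizing i with
  | zero =>
    have h : ¬ i < poz.length := by omega
    rw [pvCheckFrom]
    simp [h, List.drop_eq_nil_of_le (by omega : poz.length ≤ i), pvPairs]
  | succ n ih =>
    have h : i < poz.length := by omega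
    have hi1 : i - 1 < poz.length := by omega
    rw [pvCheckFrom]
    simp only [h, if_pos]
    have hdrop : poz.drop i = poz[i] :: poz.drop (i+1) := List.drop_eq_getElem_cons h
    have hprev : poz[i-1]? = some poz[i-1] := List.getElem?_eq_getElem hi1
    have hg1 : PySem.List.pyGetD poz ((i : Int) - 1) 0 = poz[i-1] := by
      have : ((i : Int) - 1) = ((i - 1 : Nat) : Int) := by omega
      rw [this, PySem.List.pyGetD_natCast, List.getD_eq_getElem?_getD, hprev]; rfl
    have hg2 : PySem.List.pyGetD poz (i : Int) 0 = poz[i] := by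
      rw [PySem.List.pyGetD_natCast, List.getD_eq_getElem?_getD, List.getElem?_eq_getElem h]; rfl
    rw [hdrop, hprev]
    by_cases hc : poz[i-1] > poz[i]
    · simp [pvPairs, hg1, hg2, hc]
    · have := ih (i+1) (by omega) (by omega)
      simp only [pvPairs, hg1, hg2, hc]
      rw [this]
      simp only [Nat.add_sub_cancel]
      rw [List.getElem?_eq_getElem h]
      simp

theorem pvPairs_head (l : List Int) : pvPairs l[0]? (l.drop 1) = pvPairs none l := by
  cases l with
  | nil => rfl
  | cons x xs => simp [pvPairs]


-- ===== VERDICT (by name: the statement is the Claim_ definition above) =====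
theorem verificare_ordine_elemente_pozitive_spec : Claim_equal_verificare_ordine_elemente_pozitive := by
  intro lista _
  show _ = _
  unfold verificare_ordine_elemente_pozitive verificare_ordine_elemente_pozitive_alt
  rw [PySem.List.foldl_pyRange_zero_pyGetD' lista 0
        (fun acc x => if x ≥ 0 then acc ++ [x] else acc) []]
  rw [PySem.List.foldl_append_ite_eq_filter]
  rw [pvAltGo_eq_pvPairs, pvCheckFrom_eq_pvPairs _ 1 (le_refl 1), pvPairs_head,
    List.nil_append]
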